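-- pv_equiv track=rewrite | github.com/wsylxy/Embedding-fusion | preprocess/formula_process.py | variables_unification
-- ===== SOURCE A (Python) =====
-- aplhabet = ['\\alpha', '\\beta', '\\delta', '\\epsilon', '\\eta', '\\gamma', '\\kappa', '\\lambda', '\\mu', '\\omega', '\\phi',
--                     '\\pi', '\\psi', '\\rho', '\\sigma', '\\tau', '\\theta', '\\xi', '\\zeta', '\\varepsilon', '\\varphi', '\\Delta',
--                     '\\Gamma', '\\Lambda', '\\Omega', '\\Phi', '\\Pi', '\\Psi', '\\Sigma', '\\Theta']
--
-- def variables_unification(tokens): #optional: keep original or id or id1, id2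
--     vocab_dict = {}
--     id = 0
--     result = []
--     for i in range(len(tokens)):
--         if tokens[i].isalpha() or tokens[i] in aplhabet:
--             if tokens[i] not in vocab_dict:
--                 vocab_dict[tokens[i]] = f"var_id{str(id)}"
--                 id += 1
--                 tokens[i] = vocab_dict[tokens[i]]
--             else:
--                 tokens[i] = vocab_dict[tokens[i]]
--     return tokens
-- ===== SOURCE B (Python) =====
-- aplhabet = ['\\alpha', '\\beta', '\\delta', '\\epsilon', '\\eta', '\\gamma', '\\kappa', '\\lambda', '\\mu', '\\omega', '\\phi',
--                     '\\pi', '\\psi', '\\rho', '\\sigma', '\\tau', '\\theta', '\\xi', '\\zeta', '\\varepsilon', '\\varphi', '\\Delta',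
--                     '\\Gamma', '\\Lambda', '\\Omega', '\\Phi', '\\Pi', '\\Psi', '\\Sigma', '\\Theta']
--
-- def variables_unification(tokens):
--     # Pass 1: build the complete renaming table (first-appearance order).
--     mapping = {}
--     for t in tokens:
--         if (t.isalpha() or t in aplhabet) and t not in mapping:
--             mapping[t] = f"var_id{len(mapping)}"
--     # Pass 2: apply the table in place.
--     for i in range(len(tokens)):
--         if tokens[i] in mapping:
--             tokens[i] = mapping[tokens[i]]
--     return tokens
-- ===== Notes on version B (the rewrite author's own statement) =====
-- stated objective: alternative
-- what changed: B splits A's single interleaved loop into two passes: first build the full token-to-var_id table (numbered by table size), then rewrite every token that is a key of the table; both mutate the list in place.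
import Mathlib
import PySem

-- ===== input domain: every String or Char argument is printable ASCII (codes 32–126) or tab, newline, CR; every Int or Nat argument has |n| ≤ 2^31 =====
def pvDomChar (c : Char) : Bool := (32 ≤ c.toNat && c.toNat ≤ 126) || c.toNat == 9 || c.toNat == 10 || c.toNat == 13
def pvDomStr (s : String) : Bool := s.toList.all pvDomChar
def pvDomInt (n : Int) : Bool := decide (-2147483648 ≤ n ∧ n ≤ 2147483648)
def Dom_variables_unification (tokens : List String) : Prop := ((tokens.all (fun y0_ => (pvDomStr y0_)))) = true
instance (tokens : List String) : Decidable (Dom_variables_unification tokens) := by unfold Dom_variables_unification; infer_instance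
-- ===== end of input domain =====

-- B restructures A's single interleaved rename loop into two passes (build full table, then apply it);
-- both Pythons mutate the argument list in place and return it — the equivalence proved here is about the return value.

-- the module-level constant 'aplhabet' (sic)
def pvAplhabet : List String := ["\\alpha", "\\beta", "\\delta", "\\epsilon", "\\eta", "\\gamma", "\\kappa", "\\lambda", "\\mu", "\\omega", "\\phi",
  "\\pi", "\\psi", "\\rho", "\\sigma", "\\tau", "\\theta", "\\xi", "\\zeta", "\\varepsilon", "\\varphi", "\\Delta",
  "\\Gamma", "\\Lambda", "\\Omega", "\\Phi", "\\Pi", "\\Psi", "\\Sigma", "\\Theta"]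

-- ===== PORT A =====
-- A's loop over the indices of tokens, carrying vocab_dict and id; emits the (possibly rewritten) token at each step.
def vuA_loop : List String → PySem.Dict String String → Int → List String
  | [], _, _ => []
  | t :: ts, d, id =>
    if PySem.Str.strIsalpha t || pvAplhabet.contains t then
      if !(d.contains t) then
        let d' := d.insert t ("var_id" ++ PySem.Int.toStr id)
        (d'.getD t "") :: vuA_loop ts d' (id + 1)
      else
        (d.getD t "") :: vuA_loop ts d id
    else
      t :: vuA_loop ts d id

def variables_unification (tokens : List String) : List String :=
  vuA_loop tokens PySem.Dict.empty 0

-- ===== PORT B =====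
-- B pass 1: build the complete mapping (ids numbered by current table size).
def vuB_build : List String → PySem.Dict String String → PySem.Dict String String
  | [], d => d
  | t :: ts, d =>
    vuB_build ts
      (if (PySem.Str.strIsalpha t || pvAplhabet.contains t) && !(d.contains t)
       then d.insert t ("var_id" ++ PySem.Int.toStr (d.size : Int))
       else d)

def variables_unification_alt (tokens : List String) : List String :=
  let mapping := vuB_build tokens PySem.Dict.empty
  -- B pass 2: rewrite each token that is a key of mapping
  tokens.map (fun t => if mapping.contains t then mapping.getD t "" else t)

-- ===== PRECONDITION & SPEC =====
def Spec_variables_unification (tokens : List String) (out : List String) : Prop := out = variables_unification_alt tokens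
instance (tokens : List String) (out : List String) : Decidable (Spec_variables_unification tokens out) := by unfold Spec_variables_unification; infer_instance

-- ===== CLAIM (what is proved, stated in full; the proofs are below) =====
def Claim_equal_variables_unification : Prop := ∀ (tokens : List String), Dom_variables_unification tokens → Spec_variables_unification tokens (variables_unification tokens)

-- ===== LEMMAS AND PROOFS =====

-- building never touches existing keys: their get? is preserved
lemma vuB_build_get?_of_contains (ts : List String) (d : PySem.Dict String String) (k : String)
    (h : d.contains k = true) : (vuB_build ts d).get? k = d.get? k := by
  induction ts generalizing d with
  | nil => rfl
  | cons t ts ih =>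
    simp only [vuB_build]
    split
    · rename_i hins
      have hne : k ≠ t := by
        rintro rfl
        simp [h] at hins
      rw [ih _ (by simp [PySem.Dict.contains_insert, h]), PySem.Dict.get?_insert, if_neg hne]
    · exact ih _ h

lemma vuB_build_contains_of_contains (ts : List String) (d : PySem.Dict String String) (k : String)
    (h : d.contains k = true) : (vuB_build ts d).contains k = true := by
  rw [PySem.Dict.contains_eq_isSome_get?, vuB_build_get?_of_contains ts d k h,
    ← PySem.Dict.contains_eq_isSome_get?, h]

-- a token failing the rename condition is never a key of the built table
lemma vuB_build_contains_of_not_cond (ts : List String) (d : PySem.Dict String String) (k : String)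
    (hc : (PySem.Str.strIsalpha k || pvAplhabet.contains k) = false) :
    (vuB_build ts d).contains k = d.contains k := by
  induction ts generalizing d with
  | nil => rfl
  | cons t ts ih =>
    simp only [vuB_build]
    split
    · rename_i hins
      have hne : k ≠ t := by
        rintro rfl
        simp_all
      rw [ih]
      simp [PySem.Dict.contains_insert, hne]
    · exact ih d

-- main invariant: A's interleaved loop equals mapping the fully built table over the list
lemma vuA_eq_map (ts : List String) (d : PySem.Dict String String) (id : Int)
    (hkeys : ∀ k, d.contains k = true → (PySem.Str.strIsalpha k || pvAplhabet.contains k) = true)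
    (hid : id = (d.size : Int)) :
    vuA_loop ts d id =
      ts.map (fun t => if (vuB_build ts d).contains t then (vuB_build ts d).getD t "" else t) := by
  induction ts generalizing d id with
  | nil => rfl
  | cons t ts ih =>
    simp only [vuA_loop, vuB_build, List.map_cons]
    by_cases hc : (PySem.Str.strIsalpha t || pvAplhabet.contains t) = true
    · rw [hc]
      cases hmem : d.contains t with
      | true =>
        simp only [Bool.not_true, Bool.and_false, Bool.false_eq_true, if_false]
        have hcont := vuB_build_contains_of_contains ts d t hmem
        have hget := vuB_build_get?_of_contains ts d t hmem
        rw [hcont]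
        simp only [reduceIte]
        congr 1
        · simp [PySem.Dict.getD_eq_get?_getD, hget]
        · exact ih d id hkeys hid
      | false =>
        simp only [Bool.not_false, Bool.and_true, reduceIte]
        have hdsame : d.insert t ("var_id" ++ PySem.Int.toStr (d.size : Int))
            = d.insert t ("var_id" ++ PySem.Int.toStr id) := by rw [hid]
        rw [hdsame]
        set d' := d.insert t ("var_id" ++ PySem.Int.toStr id) with hd'
        have hcont' : d'.contains t = true := PySem.Dict.contains_insert_self _ _ _
        have hcont := vuB_build_contains_of_contains ts d' t hcont'
        have hget := vuB_build_get?_of_contains ts d' t hcont'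
        rw [hcont]
        simp only [reduceIte]
        congr 1
        · simp only [PySem.Dict.getD_eq_get?_getD, hget]
        · refine ih d' (id + 1) ?_ ?_
          · intro k hk
            rw [hd', PySem.Dict.contains_insert] at hk
            rcases Bool.or_eq_true_iff.mp hk with h1 | h1
            · have : k = t := by simpa using h1
              subst this; exact hc
            · exact hkeys k h1
          · rw [hd', PySem.Dict.size_insert, hmem, hid]
            push_cast
            ring
    · have hcf : (PySem.Str.strIsalpha t || pvAplhabet.contains t) = false := by
        cases h : (PySem.Str.strIsalpha t || pvAplhabet.contains t) with
        | true => exact absurd h hc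
        | false => rfl
      rw [hcf]
      simp only [Bool.false_and, Bool.false_eq_true, if_false]
      have hcont : (vuB_build ts d).contains t = d.contains t :=
        vuB_build_contains_of_not_cond ts d t hcf
      have hmem : d.contains t = false := by
        cases h : d.contains t with
        | false => rfl
        | true => rw [hkeys t h] at hcf; cases hcf
      rw [hcont, hmem]
      simp only [Bool.false_eq_true, if_false]
      congr 1
      exact ih d id hkeys hid

-- ===== VERDICT (by name: the statement is the Claim_ definition above) =====
theorem variables_unification_spec : Claim_equal_variables_unification := by
  intro tokens _
  show variables_unification tokens = variables_unification_alt tokens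
  unfold variables_unification variables_unification_alt
  exact vuA_eq_map tokens PySem.Dict.empty 0 (by intro k hk; simp [PySem.Dict.contains_empty] at hk)
    (by simp [PySem.Dict.size_empty])
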